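-- pv_equiv track=rewrite | github.com/miliar/Code_Jam_Webscraper | solutions_python/Problem_155/804.py | compute
-- ===== SOURCE A (Python) =====
-- def compute(S):
--     total = sum(S)
--     extra = 0
--     up = 0
--     at = 0
--
--     first = True
--     while up < total:
--         if not first:
--             extra += 1
--             up += 1
--             total += 1
--         first = False
--         while at <= up and up < total:
--             up += S[at]
--             at += 1
--
--     return extra
-- ===== SOURCE B (Python) =====
-- def compute(S):
--     total = sum(S)
--     extra = 0
--     up = 0
--     absorbed = 0
--     for at, v in enumerate(S):
--         if absorbed >= total:
--             break
--         if up < at: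
--             extra += at - up
--             up = at
--         up += v
--         absorbed += v
--     return extra
-- ===== Notes on version B (the rewrite author's own statement) =====
-- stated objective: simpler
-- what changed: Replaced A's outer while-loop that pays one unit per iteration (re-entering the inner absorption loop each time) by a single pass over the elements that pays each deficit in one arithmetic step against a fixed precomputed total.
import Mathlib
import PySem

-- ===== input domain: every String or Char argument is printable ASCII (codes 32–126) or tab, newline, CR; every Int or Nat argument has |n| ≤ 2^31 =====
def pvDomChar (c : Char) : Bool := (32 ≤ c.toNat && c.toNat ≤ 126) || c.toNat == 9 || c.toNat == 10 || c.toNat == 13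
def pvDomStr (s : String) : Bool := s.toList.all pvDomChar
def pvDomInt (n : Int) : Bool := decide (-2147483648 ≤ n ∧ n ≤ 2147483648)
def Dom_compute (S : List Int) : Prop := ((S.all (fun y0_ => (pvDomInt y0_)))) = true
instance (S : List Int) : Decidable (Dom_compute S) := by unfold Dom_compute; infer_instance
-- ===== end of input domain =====

-- B replaces A's outer unit-paying while-loop with a single pass over the elements that pays each
-- deficit in one arithmetic step (objective: simpler).

-- ===== PORT A =====
-- A's inner `while at <= up and up < total: up += S[at]; at += 1`.
-- `fuel` only totalizes the while-loop (S.length + 1 is always enough, as the equivalence proof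
-- shows); `none` models the IndexError of S[at] (unreachable from compute's initial state).
def innerLoopF (S : List Int) (fuel : Nat) (total a u : Int) : Option (Int × Int) :=
  match fuel with
  | 0 => none
  | fuel + 1 =>
    if a ≤ u ∧ u < total then
      match PySem.List.pyGet? S a with
      | some v => innerLoopF S fuel total (a + 1) (u + v)
      | none => none
    else some (a, u)

-- A's outer `while up < total` loop (`first` = the Python `first` flag); `fuel` only totalizes
-- the loop (compute passes enough, as the equivalence proof shows)
def outerLoopF (S : List Int) (fuel : Nat) (total extra up a : Int) (first : Bool) : Int :=
  match fuel with
  | 0 => extra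
  | fuel + 1 =>
    if up < total then
      if first then
        match innerLoopF S (S.length + 1) total a up with
        | none => extra
        | some (a', u') => outerLoopF S fuel total extra u' a' false
      else
        match innerLoopF S (S.length + 1) (total + 1) a (up + 1) with
        | none => extra + 1
        | some (a', u') => outerLoopF S fuel (total + 1) (extra + 1) u' a' false
    else extra

def compute (S : List Int) : Int :=
  outerLoopF S (S.length + (S.map Int.natAbs).sum + 1 + 1) S.sum 0 0 0 true

-- ===== PORT B =====
-- B's single `for at, v in enumerate(S)` loop, paying each deficit at once
def altLoop (total extra up absorbed : Int) (n : Nat) (rest : List Int) : Int :=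
  match rest with
  | [] => extra
  | v :: tl =>
    if total ≤ absorbed then extra
    else if up < (n : Int) then
      altLoop total (extra + ((n : Int) - up)) ((n : Int) + v) (absorbed + v) (n + 1) tl
    else
      altLoop total extra (up + v) (absorbed + v) (n + 1) tl

def compute_alt (S : List Int) : Int := altLoop S.sum 0 0 0 0 S

-- ===== PRECONDITION & SPEC =====
def Spec_compute (S : List Int) (out : Int) : Prop := out = compute_alt S
instance (S : List Int) (out : Int) : Decidable (Spec_compute S out) := by unfold Spec_compute; infer_instance

-- ===== CLAIM (what is proved, stated in full; the proofs are below) =====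
def Claim_equal_compute : Prop := ∀ (S : List Int), Dom_compute S → Spec_compute S (compute S)

-- ===== LEMMAS AND PROOFS =====

-- once the fixed total is absorbed, B's loop returns the accumulated extra immediately
theorem altLoop_ret (total extra up absorbed : Int) (n : Nat) (rest : List Int)
    (h : total ≤ absorbed) : altLoop total extra up absorbed n rest = extra := by
  cases rest with
  | nil => rfl
  | cons v tl => rw [altLoop, if_pos h]

-- paying the whole deficit in one step equals paying 1 now and the rest at the same index
theorem alt_pay (t extra u a : Int) (n : Nat) (v : Int) (tl : List Int)
    (ha : a < t) (hu : u < (n : Int)) :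
    altLoop t extra u a n (v :: tl) = altLoop t (extra + 1) (u + 1) a n (v :: tl) := by
  rw [altLoop, altLoop]
  rw [if_neg (by omega), if_pos hu]
  by_cases h1 : u + 1 < (n : Int)
  · rw [if_pos h1]
    have e1 : extra + 1 + ((n : Int) - (u + 1)) = extra + ((n : Int) - u) := by ring
    rw [e1, if_neg (show ¬ t ≤ a from by omega)]
  · rw [if_neg h1]
    have he : u + 1 = (n : Int) := by omega
    have e2 : extra + ((n : Int) - u) = extra + 1 := by omega
    rw [he, e2, if_neg (show ¬ t ≤ a from by omega)]

-- the absolute mass of the segment [n, m) bounds the absorbed-sum difference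
theorem seg_bound (S : List Int) : ∀ (n m : Nat), n ≤ m →
    ((S.take m).sum - (S.take n).sum).natAbs + ((S.drop m).map Int.natAbs).sum ≤
      ((S.drop n).map Int.natAbs).sum := by
  intro n m h
  induction m, h using Nat.le_induction with
  | base => simp
  | succ m hm ih =>
    by_cases hlen : m < S.length
    · have h1 : (S.take (m + 1)).sum = (S.take m).sum + S[m] := by rw [List.sum_take_succ]
      have h2 : ((S.drop m).map Int.natAbs).sum =
          S[m].natAbs + ((S.drop (m + 1)).map Int.natAbs).sum := by
        rw [List.drop_eq_getElem_cons hlen, List.map_cons, List.sum_cons]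
      omega
    · have h1 : S.take (m + 1) = S.take m := by
        rw [List.take_of_length_le (by omega), List.take_of_length_le (by omega)]
      have h2 : S.drop (m + 1) = S.drop m := by
        rw [List.drop_eq_nil_of_le (by omega), List.drop_eq_nil_of_le (by omega)]
      rw [h1, h2]
      exact ih

-- A's inner absorption run advances in lockstep with B's pass (no pays happen inside it)
theorem inner_sync (S : List Int) :
    ∀ (fuel n : Nat) (extra u : Int), n ≤ S.length → S.length - n < fuel →
      u = extra + (S.take n).sum →
      ∃ m : Nat, n ≤ m ∧ m ≤ S.length ∧
        innerLoopF S fuel (S.sum + extra) (n : Int) u = some ((m : Int), extra + (S.take m).sum) ∧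
        ¬(((m : Int)) ≤ extra + (S.take m).sum ∧ (S.take m).sum < S.sum) ∧
        altLoop S.sum extra u ((S.take n).sum) n (S.drop n) =
          altLoop S.sum extra (extra + (S.take m).sum) ((S.take m).sum) m (S.drop m) := by
  intro fuel
  induction fuel with
  | zero =>
    intro n extra u h1 h2 h3
    omega
  | succ fuel ih =>
    intro n extra u h1 h2 h3
    by_cases hc : ((n : Nat) : Int) ≤ u ∧ u < S.sum + extra
    · have habs : (S.take n).sum < S.sum := by omega
      have hn : n < S.length := by
        by_contra hh
        rw [List.take_of_length_le (by omega)] at habs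
        omega
      have hget : PySem.List.pyGet? S ((n : Nat) : Int) = some S[n] := by
        rw [PySem.List.pyGet?_natCast]
        exact List.getElem?_eq_getElem hn
      have hsum : (S.take (n + 1)).sum = (S.take n).sum + S[n] := by
        rw [List.sum_take_succ]
      obtain ⟨m, hm1, hm2, hm3, hm4, hm5⟩ :=
        ih (n + 1) extra (u + S[n]) (by omega) (by omega) (by omega)
      refine ⟨m, by omega, hm2, ?_, hm4, ?_⟩
      · rw [innerLoopF, if_pos hc, hget]
        simpa using hm3
      · rw [List.drop_eq_getElem_cons hn, altLoop, if_neg (by omega), if_neg (by omega)]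
        calc altLoop S.sum extra (u + S[n]) ((S.take n).sum + S[n]) (n + 1) (S.drop (n + 1))
            = altLoop S.sum extra (u + S[n]) ((S.take (n + 1)).sum) (n + 1) (S.drop (n + 1)) := by
              rw [hsum]
          _ = _ := hm5
    · refine ⟨n, le_rfl, h1, ?_, by omega, by rw [h3]⟩
      rw [innerLoopF, if_neg hc, h3]

-- A's outer loop, from any first=false state as reached after an inner run, equals B's pass
-- (the fuel hypothesis is maintained: one unit pays for each outer iteration)
theorem outer_sync (S : List Int) :
    ∀ (fuel n : Nat) (extra u : Int), n ≤ S.length →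
      u = extra + (S.take n).sum →
      ((S.take n).sum < S.sum → u < (n : Int)) →
      ((n : Int) - u).toNat + (S.length - n) + ((S.drop n).map Int.natAbs).sum + 1 ≤ fuel →
      outerLoopF S fuel (S.sum + extra) extra u (n : Int) false =
        altLoop S.sum extra u ((S.take n).sum) n (S.drop n) := by
  intro fuel
  induction fuel with
  | zero =>
    intro n extra u h1 h4 h5 hfuel
    omega
  | succ fuel ih =>
    intro n extra u h1 h4 h5 hfuel
    by_cases hg : u < S.sum + extra
    · have habs : (S.take n).sum < S.sum := by omega
      have hun : u < (n : Int) := h5 habs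
      have hn : n < S.length := by
        by_contra hh
        rw [List.take_of_length_le (by omega)] at habs
        omega
      obtain ⟨m, hm1, hm2, hm3, hm4, hm5⟩ :=
        inner_sync S (S.length + 1) n (extra + 1) (u + 1) h1 (by omega) (by omega)
      rw [outerLoopF, if_pos hg]
      simp only [Bool.false_eq_true, if_false]
      have htot : S.sum + extra + 1 = S.sum + (extra + 1) := by omega
      rw [htot, hm3]
      rw [List.drop_eq_getElem_cons hn,
        alt_pay S.sum extra u ((S.take n).sum) n S[n] (S.drop (n + 1)) habs hun,
        ← List.drop_eq_getElem_cons hn, hm5]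
      have hseg := seg_bound S n m hm1
      exact ih m (extra + 1) (extra + 1 + (S.take m).sum) hm2 rfl (by omega) (by omega)
    · rw [outerLoopF, if_neg hg, altLoop_ret _ _ _ _ _ _ (by omega)]

-- ===== VERDICT (by name: the statement is the Claim_ definition above) =====
theorem compute_spec : Claim_equal_compute := by
  intro S _
  unfold Spec_compute compute compute_alt
  by_cases hg : (0 : Int) < S.sum
  · obtain ⟨m, hm1, hm2, hm3, hm4, hm5⟩ :=
      inner_sync S (S.length + 1) 0 0 0 (by omega) (by omega) (by simp)
    simp only [Nat.cast_zero, add_zero, zero_add, List.take_zero, List.sum_nil, List.drop_zero]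
      at hm3 hm5
    rw [outerLoopF, if_pos (by omega), if_pos rfl, hm3, hm5]
    have hseg := seg_bound S 0 m (by omega)
    simp only [List.take_zero, List.sum_nil, List.drop_zero, Int.sub_zero] at hseg
    have ho := outer_sync S (S.length + (S.map Int.natAbs).sum + 1) m 0 ((S.take m).sum) hm2
      (by omega) (by omega) (by omega)
    rw [show S.sum + 0 = S.sum from by ring] at ho
    exact ho
  · rw [outerLoopF, if_neg (by omega), altLoop_ret _ _ _ _ _ _ (by omega)]
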